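-- pv_equiv track=rewrite | github.com/gs-gsanthoshini/autorize | helpers/verb_swap.py | get_recommended_verbs_to_test
-- ===== SOURCE A (Python) =====
-- def get_recommended_verbs_to_test(original_verb, url_string):
--     """
--     Returns a prioritized list of verbs to test based on the original verb and URL
--
--     NEW FUNCTION - smart testing order
--
--     Args:
--         original_verb: Original HTTP method
--         url_string: URL being tested
--
--     Returns:
--         List of verbs to test, in priority order
--     """
--     all_verbs = ['GET', 'POST', 'PUT', 'DELETE', 'PATCH', 'HEAD', 'OPTIONS']
--     recommended = []
--
--     # Remove original verb
--     all_verbs = [v for v in all_verbs if v != original_verb]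
--
--     # If it's a POST, GET is highest priority
--     if original_verb == 'POST':
--         recommended.extend(['GET', 'PUT', 'DELETE', 'PATCH'])
--
--     # If it's a GET, POST is highest priority
--     elif original_verb == 'GET':
--         recommended.extend(['POST', 'PUT', 'DELETE'])
--
--     # For PUT, try PATCH and POST
--     elif original_verb == 'PUT':
--         recommended.extend(['PATCH', 'POST', 'GET', 'DELETE'])
--
--     # For DELETE, try GET (dangerous if works!)
--     elif original_verb == 'DELETE':
--         recommended.extend(['GET', 'POST', 'PUT'])
--
--     # Add any remaining verbs
--     for verb in all_verbs:
--         if verb not in recommended: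
--             recommended.append(verb)
--
--     return recommended
-- ===== SOURCE B (Python) =====
-- _ALL_VERBS = ['GET', 'POST', 'PUT', 'DELETE', 'PATCH', 'HEAD', 'OPTIONS']
--
-- _PRIORITY_TABLE = {
--     'POST':   ['GET', 'PUT', 'DELETE', 'PATCH', 'HEAD', 'OPTIONS'],
--     'GET':    ['POST', 'PUT', 'DELETE', 'PATCH', 'HEAD', 'OPTIONS'],
--     'PUT':    ['PATCH', 'POST', 'GET', 'DELETE', 'HEAD', 'OPTIONS'],
--     'DELETE': ['GET', 'POST', 'PUT', 'PATCH', 'HEAD', 'OPTIONS'],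
-- }
--
-- def get_recommended_verbs_to_test(original_verb, url_string):
--     verbs = _PRIORITY_TABLE.get(original_verb)
--     if verbs is not None:
--         return list(verbs)
--     return [v for v in _ALL_VERBS if v != original_verb]
-- ===== Notes on version B (the rewrite author's own statement) =====
-- stated objective: simpler
-- what changed: Replaces the if/elif prefix-extend plus dedup append-loop with a precomputed dispatch table of complete priority lists, falling back to a single filter for unknown verbs.
import Mathlib
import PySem

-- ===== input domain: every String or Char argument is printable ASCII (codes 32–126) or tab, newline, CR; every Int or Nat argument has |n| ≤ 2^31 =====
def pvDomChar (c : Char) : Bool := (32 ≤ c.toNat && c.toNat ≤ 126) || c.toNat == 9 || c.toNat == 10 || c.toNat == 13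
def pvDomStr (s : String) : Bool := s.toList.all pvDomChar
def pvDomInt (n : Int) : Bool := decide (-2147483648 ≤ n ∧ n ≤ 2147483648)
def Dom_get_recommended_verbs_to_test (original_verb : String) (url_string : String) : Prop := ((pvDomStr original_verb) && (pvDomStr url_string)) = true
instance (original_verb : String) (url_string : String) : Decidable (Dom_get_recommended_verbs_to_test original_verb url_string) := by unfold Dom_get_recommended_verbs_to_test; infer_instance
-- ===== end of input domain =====

-- ===== PORT A =====
-- B replaces A's if/elif prefix + dedup append-loop with a precomputed dispatch table (objective: simpler).
def get_recommended_verbs_to_test (original_verb : String) (_url_string : String) : List String :=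
  let all_verbs : List String := ["GET", "POST", "PUT", "DELETE", "PATCH", "HEAD", "OPTIONS"]
  let recommended : List String := []
  let all_verbs := all_verbs.filter (fun v => v != original_verb)
  let recommended :=
    if original_verb == "POST" then recommended ++ ["GET", "PUT", "DELETE", "PATCH"]
    else if original_verb == "GET" then recommended ++ ["POST", "PUT", "DELETE"]
    else if original_verb == "PUT" then recommended ++ ["PATCH", "POST", "GET", "DELETE"]
    else if original_verb == "DELETE" then recommended ++ ["GET", "POST", "PUT"]
    else recommended
  all_verbs.foldl (fun acc verb => if verb ∈ acc then acc else acc ++ [verb]) recommended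

-- ===== PORT B =====
def pvPriorityTable : PySem.Dict String (List String) := PySem.Dict.mk
  [("POST",   ["GET", "PUT", "DELETE", "PATCH", "HEAD", "OPTIONS"]),
   ("GET",    ["POST", "PUT", "DELETE", "PATCH", "HEAD", "OPTIONS"]),
   ("PUT",    ["PATCH", "POST", "GET", "DELETE", "HEAD", "OPTIONS"]),
   ("DELETE", ["GET", "POST", "PUT", "PATCH", "HEAD", "OPTIONS"])]

def get_recommended_verbs_to_test_alt (original_verb : String) (_url_string : String) : List String :=
  match PySem.Dict.get? pvPriorityTable original_verb with
  | some verbs => verbs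
  | none =>
      ["GET", "POST", "PUT", "DELETE", "PATCH", "HEAD", "OPTIONS"].filter (fun v => v != original_verb)

-- ===== PRECONDITION & SPEC =====
def Spec_get_recommended_verbs_to_test (original_verb : String) (url_string : String) (out : List String) : Prop := out = get_recommended_verbs_to_test_alt original_verb url_string
instance (original_verb : String) (url_string : String) (out : List String) : Decidable (Spec_get_recommended_verbs_to_test original_verb url_string out) := by unfold Spec_get_recommended_verbs_to_test; infer_instance

-- ===== CLAIM (what is proved, stated in full; the proofs are below) =====
def Claim_equal_get_recommended_verbs_to_test : Prop := ∀ (original_verb : String) (url_string : String), Dom_get_recommended_verbs_to_test original_verb url_string → Spec_get_recommended_verbs_to_test original_verb url_string (get_recommended_verbs_to_test original_verb url_string)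

-- ===== LEMMAS AND PROOFS =====

-- ===== VERDICT (by name: the statement is the Claim_ definition above) =====
theorem get_recommended_verbs_to_test_spec : Claim_equal_get_recommended_verbs_to_test := by
  intro ov us _
  unfold Spec_get_recommended_verbs_to_test get_recommended_verbs_to_test get_recommended_verbs_to_test_alt
  by_cases h1 : ov = "POST"; · subst h1; rfl
  by_cases h2 : ov = "GET"; · subst h2; rfl
  by_cases h3 : ov = "PUT"; · subst h3; rfl
  by_cases h4 : ov = "DELETE"; · subst h4; rfl
  by_cases h5 : ov = "PATCH"; · subst h5; rfl
  by_cases h6 : ov = "HEAD"; · subst h6; rfl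
  by_cases h7 : ov = "OPTIONS"; · subst h7; rfl
  have e1 : ("GET" != ov) = true := by simp [bne_iff_ne]; exact Ne.symm h2
  have e2 : ("POST" != ov) = true := by simp [bne_iff_ne]; exact Ne.symm h1
  have e3 : ("PUT" != ov) = true := by simp [bne_iff_ne]; exact Ne.symm h3
  have e4 : ("DELETE" != ov) = true := by simp [bne_iff_ne]; exact Ne.symm h4
  have e5 : ("PATCH" != ov) = true := by simp [bne_iff_ne]; exact Ne.symm h5
  have e6 : ("HEAD" != ov) = true := by simp [bne_iff_ne]; exact Ne.symm h6
  have e7 : ("OPTIONS" != ov) = true := by simp [bne_iff_ne]; exact Ne.symm h7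
  have b1 : ("POST" == ov) = false := by simpa using Ne.symm h1
  have b2 : ("GET" == ov) = false := by simpa using Ne.symm h2
  have b3 : ("PUT" == ov) = false := by simpa using Ne.symm h3
  have b4 : ("DELETE" == ov) = false := by simpa using Ne.symm h4
  simp [pvPriorityTable, PySem.Dict.get?, List.filter, List.foldl,
        e1, e2, e3, e4, e5, e6, e7, b1, b2, b3, b4, h1, h2, h3, h4]
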